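-- pv_equiv track=rewrite | github.com/openstack/placement | placement/tests/functional/db/test_allocation_candidates.py | _mappings_to_suffix
-- ===== SOURCE A (Python) =====
-- import collections
--
-- def _mappings_to_suffix(mappings):
--     """Turn a dict of AllocationRequest mappings keyed on suffix to
--     a dict, keyed by uuid, of lists of suffixes.
--     """
--     suffixes_by_uuid = collections.defaultdict(set)
--     for suffix, rps in mappings.items():
--         for rp_uuid in rps:
--             suffixes_by_uuid[rp_uuid].add(suffix)
--     listed_sorted_suffixes = {}
--     for rp_uuid, suffixes in suffixes_by_uuid.items():
--         listed_sorted_suffixes[rp_uuid] = sorted(list(suffixes))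
--     return listed_sorted_suffixes
-- ===== SOURCE B (Python) =====
-- def _mappings_to_suffix(mappings):
--     sorted_suffixes = sorted(mappings)
--     result = {}
--     for rps in mappings.values():
--         for u in rps:
--             if u not in result:
--                 result[u] = [s for s in sorted_suffixes if u in mappings[s]]
--     return result
-- ===== Notes on version B (the rewrite author's own statement) =====
-- stated objective: simpler
-- what changed: Instead of inverting into a defaultdict of sets and then sorting each uuid's set, B sorts the suffix keys once and, at each uuid's first occurrence, builds its value directly as the sorted suffix list filtered by membership of the uuid in that suffix's rps; this is shorter and plainer but trades A's linear inversion for a per-uuid scan over all suffixes (slower on large inputs).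
import Mathlib
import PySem

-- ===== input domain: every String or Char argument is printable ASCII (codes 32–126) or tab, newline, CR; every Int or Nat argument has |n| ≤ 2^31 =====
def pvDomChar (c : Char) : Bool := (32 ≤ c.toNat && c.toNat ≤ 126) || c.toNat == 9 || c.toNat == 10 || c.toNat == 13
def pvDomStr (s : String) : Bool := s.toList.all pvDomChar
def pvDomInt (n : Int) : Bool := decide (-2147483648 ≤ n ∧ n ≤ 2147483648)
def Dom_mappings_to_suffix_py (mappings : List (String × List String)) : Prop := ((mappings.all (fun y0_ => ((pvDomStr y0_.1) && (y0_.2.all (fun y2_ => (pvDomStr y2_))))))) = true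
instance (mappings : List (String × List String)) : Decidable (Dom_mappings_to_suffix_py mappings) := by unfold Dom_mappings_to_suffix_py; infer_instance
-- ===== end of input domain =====

-- B replaces A's set-inversion-then-per-group-sort with one dict pass that, at each uuid's first
-- occurrence, filters the once-sorted suffix list by membership; equal return values (neither mutates).

-- ===== PORT A =====
-- inner loop 'for rp_uuid in rps: suffixes_by_uuid[rp_uuid].add(suffix)' (defaultdict(set) access)
def aAddSuffix (suffix : String) (d : PySem.Dict String (PySem.Set String)) (rps : List String) :
    PySem.Dict String (PySem.Set String) :=
  rps.foldl (fun d rp_uuid =>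
    d.insert rp_uuid (PySem.Set.add (d.getD rp_uuid PySem.Set.empty) suffix)) d

def mappings_to_suffix_py (mappings : List (String × List String)) : List (String × List String) :=
  let suffixes_by_uuid : PySem.Dict String (PySem.Set String) :=
    mappings.foldl (fun d p => aAddSuffix p.1 d p.2) PySem.Dict.empty
  -- 'sorted(list(suffixes))' is order-independent in its set argument, so iterating the Set is exact
  let listed_sorted_suffixes : PySem.Dict String (List String) :=
    suffixes_by_uuid.items.foldl
      (fun d p => d.insert p.1 (PySem.List.sorted p.2 (fun x => x) false)) PySem.Dict.empty
  listed_sorted_suffixes.items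

-- ===== PORT B =====
-- '[s for s in sorted_suffixes if u in mappings[s]]'
def bSuffixList (mappings : List (String × List String)) (sorted_suffixes : List String)
    (u : String) : List String :=
  sorted_suffixes.filter (fun s => ((PySem.Dict.mk mappings).getD s []).contains u)

def mappings_to_suffix_py_alt (mappings : List (String × List String)) : List (String × List String) :=
  let sorted_suffixes := PySem.List.sorted (mappings.map Prod.fst) (fun x => x) false
  let result : PySem.Dict String (List String) :=
    mappings.foldl (fun d p =>
      p.2.foldl (fun d u =>
        if d.contains u then d else d.insert u (bSuffixList mappings sorted_suffixes u)) d)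
      PySem.Dict.empty
  result.items

-- ===== PRECONDITION & SPEC =====
-- The Python argument is a dict, whose keys are necessarily distinct; Pre_ states exactly that
-- well-formedness for its association-list representation (it excludes no actual Python input).
def Pre_mappings_to_suffix_py (mappings : List (String × List String)) : Prop :=
  (mappings.map Prod.fst).Nodup
instance (mappings : List (String × List String)) : Decidable (Pre_mappings_to_suffix_py mappings) := by
  unfold Pre_mappings_to_suffix_py; infer_instance
def pvWitness_mappings_to_suffix_py : (List (String × List String)) :=
  [("2", ["u1", "u2"]), ("1", ["u1", "u1"])]

def Spec_mappings_to_suffix_py (mappings : List (String × List String)) (out : List (String × List String)) : Prop := out = mappings_to_suffix_py_alt mappings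
instance (mappings : List (String × List String)) (out : List (String × List String)) : Decidable (Spec_mappings_to_suffix_py mappings out) := by unfold Spec_mappings_to_suffix_py; infer_instance

-- ===== CLAIM (what is proved, stated in full; the proofs are below) =====
def Claim_equal_mappings_to_suffix_py : Prop := ∀ (mappings : List (String × List String)), Dom_mappings_to_suffix_py mappings → Pre_mappings_to_suffix_py mappings → Spec_mappings_to_suffix_py mappings (mappings_to_suffix_py mappings)

-- ===== LEMMAS AND PROOFS =====

theorem set_add_idem (t : PySem.Set String) (a : String) :
    PySem.Set.add (PySem.Set.add t a) a = PySem.Set.add t a := by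
  by_cases h : a ∈ t
  · simp [PySem.Set.add, h]
  · simp [PySem.Set.add, h]

-- value of A's first loop at key u
theorem aAddSuffix_getD (s u : String) (rps : List String) (d : PySem.Dict String (PySem.Set String)) :
    (aAddSuffix s d rps).getD u PySem.Set.empty =
      if rps.contains u then PySem.Set.add (d.getD u PySem.Set.empty) s
      else d.getD u PySem.Set.empty := by
  induction rps generalizing d with
  | nil => simp [aAddSuffix]
  | cons v t ih =>
    simp only [aAddSuffix, List.foldl_cons] at *
    by_cases hv : v = u
    · subst hv
      rw [ih]
      have hsel : (d.insert v (PySem.Set.add (d.getD v PySem.Set.empty) s)).getD v PySem.Set.empty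
          = PySem.Set.add (d.getD v PySem.Set.empty) s := PySem.Dict.getD_insert_self _ _ _ _
      have hcv : ((v :: t).contains v) = true := by simp
      by_cases ht : t.contains v = true
      · rw [if_pos ht, hsel, set_add_idem, if_pos hcv]
      · rw [if_neg ht, hsel, if_pos hcv]
    · rw [ih]
      have hne : u ≠ v := fun h => hv h.symm
      rw [PySem.Dict.getD_insert_of_ne _ _ _ hne]
      have hcc : ((v :: t).contains u) = (t.contains u) := by
        simp [List.contains_cons, hne]
      rw [hcc]

theorem aPass1_getD (u : String) (ms : List (String × List String))
    (d : PySem.Dict String (PySem.Set String)) :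
    (ms.foldl (fun d p => aAddSuffix p.1 d p.2) d).getD u PySem.Set.empty =
      PySem.Set.update (d.getD u PySem.Set.empty)
        ((ms.filter (fun p => p.2.contains u)).map Prod.fst) := by
  induction ms generalizing d with
  | nil => simp [PySem.Set.update]
  | cons p t ih =>
    simp only [List.foldl_cons]
    rw [ih, aAddSuffix_getD]
    by_cases h : p.2.contains u = true
    · have hm : u ∈ p.2 := by simpa using h
      simp [PySem.Set.update, List.filter_cons, hm]
    · have hm : u ∉ p.2 := by simpa using h
      simp [PySem.Set.update, List.filter_cons, hm]

theorem aPass1_keys (ms : List (String × List String)) (d : PySem.Dict String (PySem.Set String)) :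
    (ms.foldl (fun d p => aAddSuffix p.1 d p.2) d).keys =
      PySem.Set.update d.keys (ms.flatMap Prod.snd) := by
  induction ms generalizing d with
  | nil => simp [PySem.Set.update]
  | cons p t ih =>
    simp only [List.foldl_cons]
    rw [ih]
    have h1 := PySem.Dict.keys_foldl_insert p.2
      (fun d x => PySem.Set.add (d.getD x PySem.Set.empty) p.1) d
    have h2 : aAddSuffix p.1 d p.2 =
        p.2.foldl (fun d x => d.insert x
          ((fun d x => PySem.Set.add (d.getD x PySem.Set.empty) p.1) d x)) d := rfl
    rw [h2, h1]
    simp [PySem.Set.update, List.flatMap_cons, List.foldl_append]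

theorem mem_set_update (s : PySem.Set String) (l : List String) (u : String) :
    u ∈ PySem.Set.update s l ↔ u ∈ s ∨ u ∈ l := by
  induction l generalizing s with
  | nil => simp [PySem.Set.update]
  | cons x t ih =>
    have hstep : PySem.Set.update s (x :: t) = PySem.Set.update (s.add x) t := by
      simp [PySem.Set.update]
    rw [hstep, ih]
    simp only [PySem.Set.mem_add, List.mem_cons]
    tauto

-- B's conditional-insert loops, generically in the inserted value
theorem bInner_get? (val : String → List String) (u : String) (rps : List String)
    (d : PySem.Dict String (List String)) :
    (rps.foldl (fun d u => if d.contains u then d else d.insert u (val u)) d).get? u =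
      if d.contains u then d.get? u
      else if rps.contains u then some (val u) else none := by
  induction rps generalizing d with
  | nil =>
    simp only [List.foldl_nil]
    by_cases h : d.contains u = true
    · simp [h]
    · simp only [h, Bool.false_eq_true, if_false]
      rw [PySem.Dict.contains_eq_isSome_get?] at h
      cases hg : d.get? u with
      | none => simp
      | some v => rw [hg] at h; simp at h
  | cons v t ih =>
    simp only [List.foldl_cons]
    by_cases hdv : d.contains v = true
    · simp only [hdv, if_true]
      rw [ih]
      by_cases hdu : d.contains u = true
      · simp [hdu]
      · have huv : u ≠ v := fun h => by rw [h] at hdu; exact hdu hdv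
        simp [hdu, List.contains_cons, huv]
    · simp only [hdv, Bool.false_eq_true, if_false]
      rw [ih]
      by_cases huv : u = v
      · subst huv
        simp [PySem.Dict.contains_insert, PySem.Dict.get?_insert_self, hdv, List.contains_cons]
      · have h1 : (d.insert v (val v)).contains u = d.contains u := by
          simp [PySem.Dict.contains_insert, huv]
        rw [h1, PySem.Dict.get?_insert_of_ne _ _ huv]
        by_cases hdu : d.contains u = true
        · simp [hdu]
        · simp [hdu, List.contains_cons, huv]

theorem bInner_keys (val : String → List String) (rps : List String)
    (d : PySem.Dict String (List String)) :
    (rps.foldl (fun d u => if d.contains u then d else d.insert u (val u)) d).keys =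
      PySem.Set.update d.keys rps := by
  induction rps generalizing d with
  | nil => simp [PySem.Set.update]
  | cons v t ih =>
    simp only [List.foldl_cons]
    rw [ih]
    have hstep : PySem.Set.update d.keys (v :: t) =
        PySem.Set.update (PySem.Set.add d.keys v) t := by
      simp [PySem.Set.update]
    rw [hstep]
    by_cases hdv : d.contains v = true
    · have hmem : v ∈ d.keys := (PySem.Dict.contains_iff_mem_keys _ _).mp hdv
      have hx : PySem.Set.add d.keys v = d.keys := by
        simp [PySem.Set.add, hmem]
      simp [hdv, hx]
    · have hmem : v ∉ d.keys := fun h =>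
        (by simp [hdv] : ¬ d.contains v = true) ((PySem.Dict.contains_iff_mem_keys _ _).mpr h)
      have hadd : PySem.Set.add d.keys v = d.keys ++ [v] := by
        simp [PySem.Set.add, hmem]
      rw [hadd]
      simp only [hdv, Bool.false_eq_true, if_false]
      rw [PySem.Dict.keys_insert_of_not_contains _ _ (by simp [hdv])]

theorem bOuter_get? (val : String → List String) (u : String) (ms : List (String × List String))
    (d : PySem.Dict String (List String)) :
    (ms.foldl (fun d p => p.2.foldl
        (fun d u => if d.contains u then d else d.insert u (val u)) d) d).get? u =
      if d.contains u then d.get? u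
      else if (ms.flatMap Prod.snd).contains u then some (val u) else none := by
  induction ms generalizing d with
  | nil =>
    simp only [List.foldl_nil]
    by_cases h : d.contains u = true
    · simp [h]
    · simp only [h, Bool.false_eq_true, if_false]
      rw [PySem.Dict.contains_eq_isSome_get?] at h
      cases hg : d.get? u with
      | none => simp
      | some v => rw [hg] at h; simp at h
  | cons p t ih =>
    simp only [List.foldl_cons]
    rw [ih, bInner_get? val]
    by_cases hdu : d.contains u = true
    · have hc : (p.2.foldl (fun d u => if d.contains u then d
          else d.insert u (val u)) d).contains u = true := by
        apply (PySem.Dict.contains_iff_mem_keys _ _).mpr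
        rw [bInner_keys val p.2 d]
        exact (mem_set_update _ _ _).mpr
          (Or.inl ((PySem.Dict.contains_iff_mem_keys _ _).mp hdu))
      simp [hc, hdu]
    · by_cases hp : p.2.contains u = true
      · have hm : u ∈ p.2 := by simpa using hp
        have hc : (p.2.foldl (fun d u => if d.contains u then d
            else d.insert u (val u)) d).contains u = true := by
          apply (PySem.Dict.contains_iff_mem_keys _ _).mpr
          rw [bInner_keys val p.2 d]
          exact (mem_set_update _ _ _).mpr (Or.inr hm)
        simp [hc, hdu, hm, List.flatMap_cons]
      · have hm : u ∉ p.2 := by simpa using hp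
        have hc : (p.2.foldl (fun d u => if d.contains u then d
            else d.insert u (val u)) d).contains u = false := by
          rw [← Bool.not_eq_true]
          intro hcc
          have hm2 := (PySem.Dict.contains_iff_mem_keys _ _).mp hcc
          rw [bInner_keys val p.2 d] at hm2
          rcases (mem_set_update _ _ _).mp hm2 with h | h
          · exact hdu ((PySem.Dict.contains_iff_mem_keys _ _).mpr h)
          · exact hm h
        simp only [hc, Bool.false_eq_true, if_false, hdu]
        have hfc : ((p :: t).flatMap Prod.snd).contains u = (t.flatMap Prod.snd).contains u := by
          simp [List.flatMap_cons, hm]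
        rw [hfc]

theorem bOuter_keys (val : String → List String) (ms : List (String × List String))
    (d : PySem.Dict String (List String)) :
    (ms.foldl (fun d p => p.2.foldl
        (fun d u => if d.contains u then d else d.insert u (val u)) d) d).keys =
      PySem.Set.update d.keys (ms.flatMap Prod.snd) := by
  induction ms generalizing d with
  | nil => simp [PySem.Set.update]
  | cons p t ih =>
    simp only [List.foldl_cons]
    rw [ih, bInner_keys val]
    simp [PySem.Set.update, List.flatMap_cons, List.foldl_append]

theorem set_update_of_nodup (l : List String) (acc : PySem.Set String)
    (h : (acc ++ l).Nodup) : PySem.Set.update acc l = acc ++ l := by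
  induction l generalizing acc with
  | nil => simp [PySem.Set.update]
  | cons x t ih =>
    have hx : x ∉ acc := by
      intro hmem
      rw [List.nodup_append] at h
      exact h.2.2 x hmem x (by simp) rfl
    have hadd : PySem.Set.add acc x = acc ++ [x] := by
      simp [PySem.Set.add, hx]
    have hstep : PySem.Set.update acc (x :: t) = PySem.Set.update (acc ++ [x]) t := by
      simp [PySem.Set.update, hadd]
    rw [hstep, ih (acc ++ [x]) (by simpa using h)]
    simp

theorem filter_keys_getD (u : String) (ms : List (String × List String))
    (hnd : (ms.map Prod.fst).Nodup) :
    (ms.map Prod.fst).filter (fun s => ((PySem.Dict.mk ms).getD s []).contains u) =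
      (ms.filter (fun p => p.2.contains u)).map Prod.fst := by
  induction ms with
  | nil => simp
  | cons p t ih =>
    obtain ⟨k, v⟩ := p
    simp only [List.map_cons] at hnd ⊢
    have hk : k ∉ t.map Prod.fst := (List.nodup_cons.mp hnd).1
    have hndt : (t.map Prod.fst).Nodup := (List.nodup_cons.mp hnd).2
    have hhead : (PySem.Dict.mk ((k, v) :: t)).getD k [] = v := by
      simp [PySem.Dict.getD_eq_get?_getD, PySem.Dict.get?_mk_cons]
    have htail : ∀ s ∈ t.map Prod.fst,
        ((PySem.Dict.mk ((k, v) :: t)).getD s [] |>.contains u) =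
        ((PySem.Dict.mk t).getD s [] |>.contains u) := by
      intro s hs
      have hne : (k == s) = false := by
        simp only [beq_eq_false_iff_ne]
        intro he; exact hk (he ▸ hs)
      simp [PySem.Dict.getD_eq_get?_getD, PySem.Dict.get?_mk_cons, hne]
    rw [List.filter_cons, List.filter_cons, List.filter_congr htail, ih hndt]
    simp only [hhead]
    by_cases hv : v.contains u = true
    · have hm : u ∈ v := by simpa using hv
      simp [hv, hm]
    · have hm : u ∉ v := by simpa using hv
      simp [hv, hm]

-- per-key value equality: A's sorted set = B's filtered sorted suffix list
theorem value_eq (u : String) (ms : List (String × List String))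
    (hnd : (ms.map Prod.fst).Nodup) :
    PySem.List.sorted
        (PySem.Set.update PySem.Set.empty ((ms.filter (fun p => p.2.contains u)).map Prod.fst))
        (fun x => x) false =
      bSuffixList ms (PySem.List.sorted (ms.map Prod.fst) (fun x => x) false) u := by
  have hsub : ((ms.filter (fun p => p.2.contains u)).map Prod.fst).Sublist
      (ms.map Prod.fst) := List.Sublist.map Prod.fst List.filter_sublist
  have hnds : ((ms.filter (fun p => p.2.contains u)).map Prod.fst).Nodup :=
    hnd.sublist hsub
  have hofl : PySem.Set.update PySem.Set.empty
      ((ms.filter (fun p => p.2.contains u)).map Prod.fst) =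
      (ms.filter (fun p => p.2.contains u)).map Prod.fst := by
    have h0 := set_update_of_nodup ((ms.filter (fun p => p.2.contains u)).map Prod.fst)
      [] (by simpa using hnds)
    simpa [PySem.Set.empty] using h0
  rw [hofl]
  unfold bSuffixList
  have hperm : ((PySem.List.sorted (ms.map Prod.fst) (fun x => x) false).filter
      (fun s => ((PySem.Dict.mk ms).getD s []).contains u)).Perm
      ((ms.filter (fun p => p.2.contains u)).map Prod.fst) := by
    have h1 := PySem.List.sorted_perm (ms.map Prod.fst) (fun x => x) false
    have h2 := h1.filter (fun s => ((PySem.Dict.mk ms).getD s []).contains u)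
    rw [filter_keys_getD u ms hnd] at h2
    exact h2
  have hss_nodup : (PySem.List.sorted (ms.map Prod.fst) (fun x => x) false).Nodup :=
    ((PySem.List.sorted_perm (ms.map Prod.fst) (fun x => x) false).nodup_iff).mpr hnd
  have hple := PySem.List.sorted_pairwise (ms.map Prod.fst) (fun x => x)
  have hlt : (PySem.List.sorted (ms.map Prod.fst) (fun x => x) false).Pairwise
      (fun a b => a < b) := by
    have hand := hple.and hss_nodup
    exact hand.imp (fun h => lt_of_le_of_ne h.1 h.2)
  have hpf : ((PySem.List.sorted (ms.map Prod.fst) (fun x => x) false).filter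
      (fun s => ((PySem.Dict.mk ms).getD s []).contains u)).Pairwise
      (fun a b => a < b) := List.Pairwise.sublist List.filter_sublist hlt
  exact PySem.List.sorted_eq_of_perm_of_pairwise_lt _ _ _ hperm hpf

-- ===== VERDICT (by name: the statement is the Claim_ definition above) =====

theorem main_eq (ms : List (String × List String))
    (hpre : (ms.map Prod.fst).Nodup) :
    mappings_to_suffix_py ms = mappings_to_suffix_py_alt ms := by
  simp only [mappings_to_suffix_py, mappings_to_suffix_py_alt]
  have hnodF : (PySem.Set.ofList (ms.flatMap Prod.snd)).Nodup :=
    PySem.Set.nodup_ofList _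
  have hupd_empty : ∀ l : List String,
      PySem.Set.update ([] : PySem.Set String) l = PySem.Set.ofList l := by
    intro l; simp [PySem.Set.update, PySem.Set.ofList]
  -- A side
  have hk1 : (ms.foldl (fun d p => aAddSuffix p.1 d p.2) PySem.Dict.empty).keys =
      PySem.Set.ofList (ms.flatMap Prod.snd) := by
    rw [aPass1_keys,
      show (PySem.Dict.empty : PySem.Dict String (PySem.Set String)).keys = [] from rfl,
      hupd_empty]
  have hk1nd : (ms.foldl (fun d p => aAddSuffix p.1 d p.2) PySem.Dict.empty).keys.Nodup := by
    rw [hk1]; exact hnodF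
  have hitems1 : (ms.foldl (fun d p => aAddSuffix p.1 d p.2) PySem.Dict.empty).items =
      (PySem.Set.ofList (ms.flatMap Prod.snd)).map (fun k => (k,
        (ms.foldl (fun d p => aAddSuffix p.1 d p.2) PySem.Dict.empty).getD k PySem.Set.empty)) := by
    rw [PySem.Dict.items_eq_map_keys _ hk1nd PySem.Set.empty, hk1]
  have hfresh : ∀ p ∈ (ms.foldl (fun d p => aAddSuffix p.1 d p.2) PySem.Dict.empty).items,
      (PySem.Dict.empty : PySem.Dict String (List String)).contains p.1 = false := by
    intro p _; simp [PySem.Dict.contains_empty]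
  have hndk : ((ms.foldl (fun d p => aAddSuffix p.1 d p.2) PySem.Dict.empty).items.map
      Prod.fst).Nodup := hk1nd
  have hA := PySem.Dict.items_foldl_insert_fresh
    (ms.foldl (fun d p => aAddSuffix p.1 d p.2) PySem.Dict.empty).items
    Prod.fst (fun p => PySem.List.sorted p.2 (fun x => x) false)
    PySem.Dict.empty hfresh hndk
  simp only [show (PySem.Dict.empty : PySem.Dict String (List String)).items = [] from rfl,
    List.nil_append] at hA
  rw [hA, hitems1, List.map_map]
  -- B side
  have hk2 : (ms.foldl (fun d p => p.2.foldl (fun d u => if d.contains u then d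
      else d.insert u (bSuffixList ms (PySem.List.sorted (ms.map Prod.fst) (fun x => x) false) u)) d)
      PySem.Dict.empty).keys = PySem.Set.ofList (ms.flatMap Prod.snd) := by
    rw [bOuter_keys (bSuffixList ms (PySem.List.sorted (ms.map Prod.fst) (fun x => x) false)),
      show (PySem.Dict.empty : PySem.Dict String (List String)).keys = [] from rfl,
      hupd_empty]
  have hk2nd : (ms.foldl (fun d p => p.2.foldl (fun d u => if d.contains u then d
      else d.insert u (bSuffixList ms (PySem.List.sorted (ms.map Prod.fst) (fun x => x) false) u)) d)
      PySem.Dict.empty).keys.Nodup := by rw [hk2]; exact hnodF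
  rw [PySem.Dict.items_eq_map_keys _ hk2nd [], hk2]
  apply List.map_congr_left
  intro u hu
  have huF : u ∈ ms.flatMap Prod.snd := (PySem.Set.mem_ofList _ _).mp hu
  have hgB : (ms.foldl (fun d p => p.2.foldl (fun d u => if d.contains u then d
      else d.insert u (bSuffixList ms (PySem.List.sorted (ms.map Prod.fst) (fun x => x) false) u)) d)
      PySem.Dict.empty).getD u [] =
      bSuffixList ms (PySem.List.sorted (ms.map Prod.fst) (fun x => x) false) u := by
    rw [PySem.Dict.getD_eq_get?_getD,
      bOuter_get? (bSuffixList ms (PySem.List.sorted (ms.map Prod.fst) (fun x => x) false)) u ms]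
    have hcF : (ms.flatMap Prod.snd).contains u = true := by simpa using huF
    rw [if_neg (by simp : ¬ ((PySem.Dict.empty : PySem.Dict String (List String)).contains u = true)),
      if_pos hcF]
    rfl
  rw [hgB]
  simp only [Function.comp]
  rw [aPass1_getD]
  simp only [PySem.Dict.getD_empty]
  rw [value_eq u ms hpre]

theorem mappings_to_suffix_py_spec : Claim_equal_mappings_to_suffix_py := by
  intro ms _ hpre
  unfold Spec_mappings_to_suffix_py
  exact main_eq ms hpre
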